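-- pv_equiv track=rewrite | github.com/egordionok/MAI | CompMath/Lab4/prog1.py | block_to_list
-- ===== SOURCE A (Python) =====
-- def block_to_list(__matrix):
--     arr = []
--     n = -1
--     for i in __matrix:              # строка блоков
--         arr.append([])
--         n += 1
--         for j in i:                 # блок в строке
--             for k in j[0]:          # строка1 в блоке
--                 arr[n].append(k)
--         arr.append([])
--         n += 1
--         for j in i:                 # блок в строке
--             if len(j) > 1:
--                 for k in j[1]:      # строка2 в блоке
--                     arr[n].append(k)
--
--     return arr
-- ===== SOURCE B (Python) =====
-- def block_to_list(__matrix):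
--     arr = []
--     for i in __matrix:
--         r1 = []
--         r2 = []
--         for j in i:
--             r1.extend(j[0])
--             if len(j) > 1:
--                 r2.extend(j[1])
--         arr.append(r1)
--         arr.append(r2)
--     return arr
-- ===== Notes on version B (the rewrite author's own statement) =====
-- stated objective: simpler
-- what changed: One pass per block-row maintaining both output rows (r1, r2) at once, instead of A's two separate scans of the block list with an index-tracked append-then-mutate result list.
import Mathlib
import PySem

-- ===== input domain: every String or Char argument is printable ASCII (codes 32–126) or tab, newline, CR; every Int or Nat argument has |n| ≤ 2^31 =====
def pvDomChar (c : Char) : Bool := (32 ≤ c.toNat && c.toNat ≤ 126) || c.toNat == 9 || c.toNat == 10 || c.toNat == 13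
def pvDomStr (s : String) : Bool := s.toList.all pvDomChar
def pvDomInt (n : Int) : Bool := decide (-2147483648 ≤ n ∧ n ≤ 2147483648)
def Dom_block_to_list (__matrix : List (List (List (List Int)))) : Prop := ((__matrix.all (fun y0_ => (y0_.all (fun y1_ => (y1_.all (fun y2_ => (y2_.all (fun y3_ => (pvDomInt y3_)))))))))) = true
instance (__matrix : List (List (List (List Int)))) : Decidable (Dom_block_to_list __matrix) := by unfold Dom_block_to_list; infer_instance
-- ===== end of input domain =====

-- B builds each block-row's two output rows in ONE pass over the blocks (pair accumulator),
-- instead of A's two separate scans of the block list; return values proved equal on Pre_.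

-- ===== PORT A =====
-- j[0] / j[1] ported via pyGet?; under Pre_ (no empty block) j[0] exists, and j[1] is
-- only read when len(j) > 1, so .getD [] is exact there.
def block_to_list (__matrix : List (List (List (List Int)))) : List (List Int) :=
  __matrix.foldl (fun arr i =>
    (arr ++ [i.foldl (fun row j =>
      ((PySem.List.pyGet? j 0).getD []).foldl (fun r k => r ++ [k]) row) []]) ++
    [i.foldl (fun row j =>
      if j.length > 1 then
        ((PySem.List.pyGet? j 1).getD []).foldl (fun r k => r ++ [k]) row
      else row) []]) []

-- ===== PORT B =====
def block_to_list_alt (__matrix : List (List (List (List Int)))) : List (List Int) :=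
  __matrix.foldl (fun arr i =>
    let p := i.foldl (fun (rs : List Int × List Int) j =>
      (rs.1 ++ (PySem.List.pyGet? j 0).getD [],
       if j.length > 1 then rs.2 ++ (PySem.List.pyGet? j 1).getD [] else rs.2))
      ([], [])
    arr ++ [p.1, p.2]) []

-- ===== PRECONDITION & SPEC =====
-- Pre_ excludes any input containing an empty block: there j[0] raises IndexError in A (and in B).
def Pre_block_to_list (__matrix : List (List (List (List Int)))) : Prop :=
  ∀ i ∈ __matrix, ∀ j ∈ i, j ≠ []
instance (__matrix : List (List (List (List Int)))) : Decidable (Pre_block_to_list __matrix) := by unfold Pre_block_to_list; infer_instance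
def pvWitness_block_to_list : List (List (List (List Int))) := [[[[1, 2], [3, 4]], [[5]]], [[[6], [7]]]]
def Spec_block_to_list (__matrix : List (List (List (List Int)))) (out : List (List Int)) : Prop := out = block_to_list_alt __matrix
instance (__matrix : List (List (List (List Int)))) (out : List (List Int)) : Decidable (Spec_block_to_list __matrix out) := by unfold Spec_block_to_list; infer_instance

-- ===== CLAIM (what is proved, stated in full; the proofs are below) =====
def Claim_equal_block_to_list : Prop := ∀ (__matrix : List (List (List (List Int)))), Dom_block_to_list __matrix → Pre_block_to_list __matrix → Spec_block_to_list __matrix (block_to_list __matrix)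

-- ===== LEMMAS AND PROOFS =====

def pvR1 (i : List (List (List Int))) : List Int :=
  i.flatMap (fun j => (PySem.List.pyGet? j 0).getD [])
def pvR2 (i : List (List (List Int))) : List Int :=
  i.flatMap (fun j => if j.length > 1 then (PySem.List.pyGet? j 1).getD [] else [])

-- appending elements one by one = appending the list
theorem pv_foldl_snoc (xs : List Int) (r : List Int) :
    xs.foldl (fun r k => r ++ [k]) r = r ++ xs := by
  induction xs generalizing r with
  | nil => simp
  | cons x xs ih => rw [List.foldl_cons, ih, List.append_assoc]; rfl

-- A's first scan over a block-row
theorem pv_row1 (i : List (List (List Int))) (r : List Int) :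
    i.foldl (fun row j => ((PySem.List.pyGet? j 0).getD []).foldl (fun r k => r ++ [k]) row) r
      = r ++ pvR1 i := by
  induction i generalizing r with
  | nil => simp [pvR1]
  | cons j i ih =>
    rw [List.foldl_cons, pv_foldl_snoc, ih]
    simp only [pvR1, List.flatMap_cons, List.append_assoc]

-- A's second scan over a block-row
theorem pv_row2 (i : List (List (List Int))) (r : List Int) :
    i.foldl (fun row j =>
      if j.length > 1 then ((PySem.List.pyGet? j 1).getD []).foldl (fun r k => r ++ [k]) row else row) r
      = r ++ pvR2 i := by
  induction i generalizing r with
  | nil => simp [pvR2]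
  | cons j i ih =>
    rw [List.foldl_cons]
    by_cases h : j.length > 1
    · rw [if_pos h, pv_foldl_snoc, ih]
      simp only [pvR2, List.flatMap_cons, if_pos h, List.append_assoc]
    · rw [if_neg h, ih]
      simp only [pvR2, List.flatMap_cons, if_neg h, List.nil_append]

-- B's single pass computes both rows at once
theorem pv_pair (i : List (List (List Int))) (a b : List Int) :
    i.foldl (fun (rs : List Int × List Int) j =>
      (rs.1 ++ (PySem.List.pyGet? j 0).getD [],
       if j.length > 1 then rs.2 ++ (PySem.List.pyGet? j 1).getD [] else rs.2)) (a, b)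
      = (a ++ pvR1 i, b ++ pvR2 i) := by
  induction i generalizing a b with
  | nil => simp [pvR1, pvR2]
  | cons j i ih =>
    rw [List.foldl_cons]
    by_cases h : j.length > 1
    · show _ = _
      rw [show (if j.length > 1 then b ++ (PySem.List.pyGet? j 1).getD [] else b)
            = b ++ (PySem.List.pyGet? j 1).getD [] from if_pos h, ih]
      simp only [pvR1, pvR2, List.flatMap_cons, if_pos h, List.append_assoc]
    · rw [show (if j.length > 1 then b ++ (PySem.List.pyGet? j 1).getD [] else b) = b from if_neg h, ih]
      simp only [pvR1, pvR2, List.flatMap_cons, if_neg h, List.nil_append, List.append_assoc]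

theorem pv_A_acc (m : List (List (List (List Int)))) (acc : List (List Int)) :
    m.foldl (fun arr i =>
      (arr ++ [i.foldl (fun row j =>
        ((PySem.List.pyGet? j 0).getD []).foldl (fun r k => r ++ [k]) row) []]) ++
      [i.foldl (fun row j =>
        if j.length > 1 then ((PySem.List.pyGet? j 1).getD []).foldl (fun r k => r ++ [k]) row
        else row) []]) acc
      = acc ++ m.flatMap (fun i => [pvR1 i, pvR2 i]) := by
  induction m generalizing acc with
  | nil => simp
  | cons i m ih =>
    rw [List.foldl_cons, pv_row1, pv_row2, ih]
    simp only [List.flatMap_cons, List.nil_append, List.append_assoc]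
    rfl

theorem pv_B_acc (m : List (List (List (List Int)))) (acc : List (List Int)) :
    m.foldl (fun arr i =>
      let p := i.foldl (fun (rs : List Int × List Int) j =>
        (rs.1 ++ (PySem.List.pyGet? j 0).getD [],
         if j.length > 1 then rs.2 ++ (PySem.List.pyGet? j 1).getD [] else rs.2)) ([], [])
      arr ++ [p.1, p.2]) acc
      = acc ++ m.flatMap (fun i => [pvR1 i, pvR2 i]) := by
  induction m generalizing acc with
  | nil => simp
  | cons i m ih =>
    rw [List.foldl_cons]
    show List.foldl _ (acc ++ [(List.foldl _ (([] : List Int), ([] : List Int)) i).1,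
      (List.foldl _ (([] : List Int), ([] : List Int)) i).2]) m = _
    rw [pv_pair, ih]
    simp only [List.flatMap_cons, List.nil_append, List.append_assoc]

theorem pv_eq (m : List (List (List (List Int)))) :
    block_to_list m = block_to_list_alt m := by
  unfold block_to_list block_to_list_alt
  rw [pv_A_acc, pv_B_acc]

-- ===== VERDICT (by name: the statement is the Claim_ definition above) =====
theorem block_to_list_spec : Claim_equal_block_to_list := by
  intro m _ _
  unfold Spec_block_to_list
  exact pv_eq m
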